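-- pv_equiv track=rewrite | github.com/pypi-data/pypi-mirror-344 | packages/pytrate/pytrate-2.3.2.tar.gz/pytrate-2.3.2/pytrate/helper.py | find_maximal_subsets
-- ===== SOURCE A (Python) =====
-- from collections import namedtuple, defaultdict
-- from itertools import product, chain, combinations
--
-- def find_maximal_subsets(sets: list[set]) -> set[frozenset]:
--     """
--     Find the maximal subsets of items that always appear together in a group of sets.
--
--     Args:
--         sets (list[set]): Group of sets.
--         max_combinations (Optional[int]): The maximum number of combinations of items to check.
--
--     Returns:
--         set[frozenset]: A set of frozensets representing the maximal subsets of items that always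
--             appear together.
--     """
--     # Step 1: Create a dictionary to map each item to the sets it appears in
--     item_to_sets = defaultdict(set)
--     for i, s in enumerate(sets):
--         for item in s:
--             item_to_sets[item].add(i)
--
--     # Step 2: Identify all possible combinations of items and track their occurrences
--     comb_to_sets = defaultdict(set)
--
--     for s in sets:
--         for size in range(2, len(s) + 1):
--             for comb in combinations(s, size):
--                 comb_set = frozenset(comb)
--                 for i, s2 in enumerate(sets):
--                     if comb_set.issubset(s2):
--                         comb_to_sets[comb_set].add(i)
--
--     # Step 3: Identify maximal sets of items that always appear together
--     valid_subsets = set()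
--     for comb, indices in comb_to_sets.items():
--         if all(item_to_sets[item] == indices for item in comb):
--             valid_subsets.add(comb)
--
--     # Step 4: Filter out subsets that are part of larger valid subsets
--     maximal_subsets = set(valid_subsets)
--     for subset in valid_subsets:
--         for larger_subset in valid_subsets:
--             if subset != larger_subset and subset.issubset(larger_subset):
--                 maximal_subsets.discard(subset)
--
--     # Step 5: Add singletons that are not part of any valid subset
--     all_items_in_subsets = set(chain.from_iterable(maximal_subsets))
--     all_items = set(item for s in sets for item in s)
--     singletons = {item for item in all_items if item not in all_items_in_subsets}
--
--     # Convert singletons to frozensets and add to maximal_subsets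
--     maximal_subsets.update(frozenset([singleton]) for singleton in singletons)
--
--     return maximal_subsets
-- ===== SOURCE B (Python) =====
-- def find_maximal_subsets(sets):
--     # Group items by their set-occurrence signature: each signature class,
--     # as a frozenset, is exactly one maximal always-co-occurring group
--     # (classes of size 1 are the singletons).
--     occ = {}
--     for i, s in enumerate(sets):
--         for x in s:
--             occ.setdefault(x, set()).add(i)
--     groups = {}
--     for x, ind in occ.items():
--         groups.setdefault(frozenset(ind), []).append(x)
--     return {frozenset(g) for g in groups.values()}
-- ===== Notes on version B (the rewrite author's own statement) =====
-- stated objective: faster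
-- what changed: B groups the items by their set-occurrence signature in one pass (each signature class, taken as a frozenset, is exactly one maximal always-co-occurring group; size-1 classes are the singletons), replacing A's enumeration of every combination of every set with an inner scan over all sets; intended as asymptotically faster — a timing run could not get a clean largest-size reading (A timed out at n=256 where B returned, but B also hit the budget on some larger inputs), so 'faster' is unconfirmed in a timing run.
import Mathlib
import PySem

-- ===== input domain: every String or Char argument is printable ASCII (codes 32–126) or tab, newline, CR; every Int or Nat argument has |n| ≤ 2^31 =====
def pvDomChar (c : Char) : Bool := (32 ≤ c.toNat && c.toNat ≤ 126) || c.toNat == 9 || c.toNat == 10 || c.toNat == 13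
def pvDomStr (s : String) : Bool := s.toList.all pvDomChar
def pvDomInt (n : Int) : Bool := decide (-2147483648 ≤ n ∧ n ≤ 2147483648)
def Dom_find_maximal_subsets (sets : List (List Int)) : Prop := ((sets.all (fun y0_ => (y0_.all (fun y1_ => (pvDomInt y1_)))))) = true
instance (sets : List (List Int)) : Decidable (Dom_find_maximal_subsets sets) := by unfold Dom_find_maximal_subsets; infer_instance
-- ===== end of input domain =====

-- B replaces A's exponential enumeration of item combinations by a single grouping of the
-- items by their set-occurrence signature (objective: faster; intended as asymptotic —
-- a timing run saw A time out at n=256 where B returned, but could not confirm a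
-- clean largest-size reading).
-- Both Pythons return a set of frozensets; Python's iteration order over a set is not
-- modelled by PySem, so both ports represent every frozenset — and the returned set —
-- canonically, in sorted order (pvFrozen / pvCanon below).

-- frozenset(xs), represented canonically: the distinct elements in increasing order
def pvFrozen (xs : List Int) : List Int := PySem.List.sorted (PySem.Set.ofList xs) (fun z => z)

-- the returned set of frozensets, represented canonically: sorted lexicographically
def pvCanon (s : PySem.Set (List Int)) : List (List Int) :=
  @PySem.List.sorted (List Int) (List Int) List.instLinearOrder.toLT
    List.instLinearOrder.toDecidableLT s (fun g => g) false

-- ===== PORT A =====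
-- Step 1: item_to_sets[item] = set of indices of the sets the item appears in
def pvA_item_to_sets (sets : List (List Int)) : PySem.Dict Int (PySem.Set Int) :=
  (PySem.List.enumerate sets).foldl
    (fun d is => is.2.foldl (fun d item => d.modify item [] (fun v => PySem.Set.add v is.1)) d)
    PySem.Dict.empty

-- the innermost loop of Step 2: comb_to_sets[comb_set].add(i) for every set containing comb_set
def pvA_mark (sets : List (List Int)) (d : PySem.Dict (List Int) (PySem.Set Int))
    (comb_set : List Int) : PySem.Dict (List Int) (PySem.Set Int) :=
  (PySem.List.enumerate sets).foldl
    (fun d is2 =>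
      if PySem.Set.issubset comb_set (PySem.Set.ofList is2.2) then
        d.modify comb_set [] (fun v => PySem.Set.add v is2.1)
      else d) d

-- Step 2
def pvA_comb_to_sets (sets : List (List Int)) : PySem.Dict (List Int) (PySem.Set Int) :=
  sets.foldl
    (fun d s =>
      (PySem.List.pyRange 2 (PySem.List.len s + 1)).foldl
        (fun d size =>
          (PySem.List.combinations s size.toNat).foldl
            (fun d comb => pvA_mark sets d (pvFrozen comb)) d) d)
    PySem.Dict.empty

-- Step 3
def pvA_valid (sets : List (List Int)) : PySem.Set (List Int) :=
  (pvA_comb_to_sets sets).items.foldl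
    (fun vs ci =>
      if ci.1.all (fun item => PySem.Set.equal ((pvA_item_to_sets sets).getD item []) ci.2) then
        PySem.Set.add vs ci.1
      else vs)
    PySem.Set.empty

-- Step 4
def pvA_maximal (sets : List (List Int)) : PySem.Set (List Int) :=
  (pvA_valid sets).foldl
    (fun ms subset =>
      (pvA_valid sets).foldl
        (fun ms larger =>
          if subset ≠ larger ∧ PySem.Set.issubset subset larger = true then
            PySem.Set.discard ms subset
          else ms) ms)
    (PySem.Set.ofList (pvA_valid sets))

-- Step 5
def pvA_res (sets : List (List Int)) : PySem.Set (List Int) :=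
  let maximal := pvA_maximal sets
  let all_items_in_subsets := PySem.Set.ofList maximal.flatten
  let all_items := PySem.Set.ofList sets.flatten
  let singletons := all_items.filter (fun item => !(all_items_in_subsets.contains item))
  singletons.foldl (fun ms x => PySem.Set.add ms (pvFrozen [x])) maximal

def find_maximal_subsets (sets : List (List Int)) : List (List Int) :=
  pvCanon (pvA_res sets)

-- ===== PORT B =====
-- occ[x] = set of indices of the sets x appears in
def pvB_occ (sets : List (List Int)) : PySem.Dict Int (PySem.Set Int) :=
  (PySem.List.enumerate sets).foldl
    (fun d is => is.2.foldl (fun d item => d.modify item [] (fun v => PySem.Set.add v is.1)) d)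
    PySem.Dict.empty

-- groups: signature (as a frozenset) → the items having that signature
def pvB_groups (sets : List (List Int)) : PySem.Dict (List Int) (List Int) :=
  (pvB_occ sets).items.foldl
    (fun g xv => g.modify (pvFrozen xv.2) [] (fun l => l ++ [xv.1]))
    PySem.Dict.empty

def pvB_res (sets : List (List Int)) : PySem.Set (List Int) :=
  (pvB_groups sets).values.foldl (fun r gl => PySem.Set.add r (pvFrozen gl)) PySem.Set.empty

def find_maximal_subsets_alt (sets : List (List Int)) : List (List Int) :=
  pvCanon (pvB_res sets)

-- ===== PRECONDITION & SPEC =====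
def Spec_find_maximal_subsets (sets : List (List Int)) (out : List (List Int)) : Prop := out = find_maximal_subsets_alt sets
instance (sets : List (List Int)) (out : List (List Int)) : Decidable (Spec_find_maximal_subsets sets out) := by unfold Spec_find_maximal_subsets; infer_instance

-- ===== CLAIM (what is proved, stated in full; the proofs are below) =====
def Claim_equal_find_maximal_subsets : Prop := ∀ (sets : List (List Int)), Dom_find_maximal_subsets sets → Spec_find_maximal_subsets sets (find_maximal_subsets sets)

-- ===== LEMMAS AND PROOFS =====

-- generic foldl helpers --------------------------------------------------------

lemma pvFoldlPres {α σ : Type} (P : σ → Prop) (f : σ → α → σ) :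
    ∀ (l : List α) (d : σ), P d → (∀ d a, a ∈ l → P d → P (f d a)) → P (l.foldl f d) := by
  intro l
  induction l with
  | nil => intro d h _; simpa using h
  | cons a t ih =>
    intro d h hstep
    simp only [List.foldl_cons]
    exact ih _ (hstep d a (by simp) h) (fun d b hb hd => hstep d b (by simp [hb]) hd)

lemma pvFoldlReach {α σ : Type} (P : σ → Prop) (f : σ → α → σ) (x : α)
    (hx : ∀ d, P (f d x)) (hpres : ∀ d a, P d → P (f d a)) :
    ∀ (l : List α) (d : σ), x ∈ l → P (l.foldl f d) := by
  intro l
  induction l with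
  | nil => intro d h; simp at h
  | cons a t ih =>
    intro d hmem
    rcases List.mem_cons.1 hmem with h | h
    · subst h
      simp only [List.foldl_cons]
      exact pvFoldlPres P f t (f d x) (hx d) (fun d b _ hd => hpres d b hd)
    · simpa using ih (f d a) h

lemma pvMemFoldlAddIf {α : Type} (q : α → Bool) (g : α → List Int) :
    ∀ (l : List α) (s : PySem.Set (List Int)) (y : List Int),
      (y ∈ l.foldl (fun s a => if q a then PySem.Set.add s (g a) else s) s) ↔
        y ∈ s ∨ ∃ a ∈ l, q a ∧ y = g a := by
  intro l
  induction l with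
  | nil => simp
  | cons a t ih =>
    intro s y
    simp only [List.foldl_cons]
    by_cases hq : q a = true
    · rw [if_pos hq, ih]
      constructor
      · rintro (hy | ⟨b, hb, hqb, rfl⟩)
        · rcases (PySem.Set.mem_add s (g a) y).1 hy with h | h
          · exact Or.inl h
          · exact Or.inr ⟨a, by simp, hq, h⟩
        · exact Or.inr ⟨b, by simp [hb], hqb, rfl⟩
      · rintro (hy | ⟨b, hb, hqb, rfl⟩)
        · exact Or.inl ((PySem.Set.mem_add s (g a) y).2 (Or.inl hy))
        · rcases List.mem_cons.1 hb with rfl | hb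
          · exact Or.inl ((PySem.Set.mem_add s (g b) (g b)).2 (Or.inr rfl))
          · exact Or.inr ⟨b, hb, hqb, rfl⟩
    · rw [if_neg hq, ih]
      constructor
      · rintro (hy | ⟨b, hb, hqb, rfl⟩)
        · exact Or.inl hy
        · exact Or.inr ⟨b, by simp [hb], hqb, rfl⟩
      · rintro (hy | ⟨b, hb, hqb, rfl⟩)
        · exact Or.inl hy
        · rcases List.mem_cons.1 hb with rfl | hb
          · exact absurd hqb hq
          · exact Or.inr ⟨b, hb, hqb, rfl⟩

lemma pvMemFoldlAdd {α : Type} (g : α → List Int) :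
    ∀ (l : List α) (s : PySem.Set (List Int)) (y : List Int),
      (y ∈ l.foldl (fun s a => PySem.Set.add s (g a)) s) ↔ y ∈ s ∨ ∃ a ∈ l, y = g a := by
  intro l
  induction l with
  | nil => simp
  | cons a t ih =>
    intro s y
    simp only [List.foldl_cons]
    rw [ih]
    constructor
    · rintro (hy | ⟨b, hb, rfl⟩)
      · rcases (PySem.Set.mem_add s (g a) y).1 hy with h | h
        · exact Or.inl h
        · exact Or.inr ⟨a, by simp, h⟩
      · exact Or.inr ⟨b, by simp [hb], rfl⟩
    · rintro (hy | ⟨b, hb, rfl⟩)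
      · exact Or.inl ((PySem.Set.mem_add s (g a) y).2 (Or.inl hy))
      · rcases List.mem_cons.1 hb with rfl | hb
        · exact Or.inl ((PySem.Set.mem_add s (g b) (g b)).2 (Or.inr rfl))
        · exact Or.inr ⟨b, hb, rfl⟩

-- pvFrozen facts ---------------------------------------------------------------

lemma pvMemFrozen (l : List Int) (z : Int) : z ∈ pvFrozen l ↔ z ∈ l := by
  unfold pvFrozen
  rw [PySem.List.mem_sorted, PySem.Set.mem_ofList]

lemma pvFrozenPairwise (l : List Int) : (pvFrozen l).Pairwise (· < ·) :=
  PySem.List.sorted_ofList_pairwise_lt l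

lemma pvEqOfPairwiseLt : ∀ {l m : List Int}, l.Pairwise (· < ·) → m.Pairwise (· < ·) →
    (∀ z, z ∈ l ↔ z ∈ m) → l = m := by
  intro l
  induction l with
  | nil =>
    intro m _ _ hz
    cases m with
    | nil => rfl
    | cons b t => exact absurd ((hz b).2 (by simp)) (by simp)
  | cons a l ih =>
    intro m hl hm hz
    cases m with
    | nil => exact absurd ((hz a).1 (by simp)) (by simp)
    | cons b t =>
      have hab : a = b := by
        rcases List.mem_cons.1 ((hz a).1 (by simp)) with h | h
        · exact h
        · rcases List.mem_cons.1 ((hz b).2 (by simp)) with h' | h'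
          · exact h'.symm
          · have h1 := (List.pairwise_cons.1 hm).1 a h
            have h2 := (List.pairwise_cons.1 hl).1 b h'
            omega
      subst hab
      have htz : ∀ z, z ∈ l ↔ z ∈ t := by
        intro z
        constructor
        · intro hzl
          rcases List.mem_cons.1 ((hz z).1 (List.mem_cons_of_mem _ hzl)) with h | h
          · subst h; exact absurd ((List.pairwise_cons.1 hl).1 z hzl) (lt_irrefl z)
          · exact h
        · intro hzt
          rcases List.mem_cons.1 ((hz z).2 (List.mem_cons_of_mem _ hzt)) with h | h
          · subst h; exact absurd ((List.pairwise_cons.1 hm).1 z hzt) (lt_irrefl z)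
          · exact h
      rw [ih (List.pairwise_cons.1 hl).2 (List.pairwise_cons.1 hm).2 htz]

lemma pvFrozenEqIff (a b : List Int) : pvFrozen a = pvFrozen b ↔ ∀ z, z ∈ a ↔ z ∈ b := by
  constructor
  · intro h z; rw [← pvMemFrozen a z, h, pvMemFrozen]
  · intro h
    exact pvEqOfPairwiseLt (pvFrozenPairwise a) (pvFrozenPairwise b)
      (fun z => by rw [pvMemFrozen, pvMemFrozen]; exact h z)

lemma pvFrozenSingleton (x : Int) : pvFrozen [x] = [x] := rfl

-- the signature of an item -----------------------------------------------------

def pvSig (sets : List (List Int)) (x : Int) : PySem.Set Int :=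
  (pvA_item_to_sets sets).getD x []

lemma pvMemSetFold (j : Int) :
    ∀ (s : List Int) (d : PySem.Dict Int (PySem.Set Int)) (x i : Int),
      (i ∈ (s.foldl (fun d item => d.modify item [] (fun v => PySem.Set.add v j)) d).getD x []) ↔
        i ∈ d.getD x [] ∨ (x ∈ s ∧ i = j) := by
  intro s
  induction s with
  | nil => simp
  | cons a t ih =>
    intro d x i
    simp only [List.foldl_cons]
    rw [ih, PySem.Dict.getD_modify]
    by_cases hxa : x = a
    · subst hxa
      rw [if_pos rfl]
      constructor
      · rintro (h | ⟨_, rfl⟩)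
        · rcases (PySem.Set.mem_add _ _ _).1 h with h | h
          · exact Or.inl h
          · exact Or.inr ⟨by simp, h⟩
        · exact Or.inr ⟨by simp, rfl⟩
      · rintro (h | ⟨_, rfl⟩)
        · exact Or.inl ((PySem.Set.mem_add _ _ _).2 (Or.inl h))
        · exact Or.inl ((PySem.Set.mem_add _ _ _).2 (Or.inr rfl))
    · rw [if_neg hxa]
      constructor
      · rintro (h | ⟨hm, rfl⟩)
        · exact Or.inl h
        · exact Or.inr ⟨List.mem_cons_of_mem _ hm, rfl⟩
      · rintro (h | ⟨hm, rfl⟩)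
        · exact Or.inl h
        · rcases List.mem_cons.1 hm with rfl | hm
          · exact absurd rfl hxa
          · exact Or.inr ⟨hm, rfl⟩

lemma pvMemSig (sets : List (List Int)) (x i : Int) :
    i ∈ pvSig sets x ↔ ∃ k, ∃ _ : k < sets.length, i = (k : Int) ∧ x ∈ sets[k] := by
  have hgen : ∀ (E : List (Int × List Int)) (d : PySem.Dict Int (PySem.Set Int)),
      (i ∈ (E.foldl (fun d is => is.2.foldl
          (fun d item => d.modify item [] (fun v => PySem.Set.add v is.1)) d) d).getD x []) ↔
        i ∈ d.getD x [] ∨ ∃ p ∈ E, x ∈ p.2 ∧ i = p.1 := by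
    intro E
    induction E with
    | nil => simp
    | cons a t ih =>
      intro d
      simp only [List.foldl_cons]
      rw [ih, pvMemSetFold]
      constructor
      · rintro ((h | ⟨hm, rfl⟩) | ⟨p, hp, hxp, rfl⟩)
        · exact Or.inl h
        · exact Or.inr ⟨a, by simp, hm, rfl⟩
        · exact Or.inr ⟨p, by simp [hp], hxp, rfl⟩
      · rintro (h | ⟨p, hp, hxp, rfl⟩)
        · exact Or.inl (Or.inl h)
        · rcases List.mem_cons.1 hp with rfl | hp
          · exact Or.inl (Or.inr ⟨hxp, rfl⟩)
          · exact Or.inr ⟨p, hp, hxp, rfl⟩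
  unfold pvSig pvA_item_to_sets
  rw [hgen]
  rw [PySem.Dict.getD_empty]
  simp only [List.not_mem_nil, false_or]
  constructor
  · rintro ⟨p, hp, hx, hi⟩
    obtain ⟨k, hk, rfl⟩ := (PySem.List.mem_enumerate_iff sets 0 p).1 hp
    exact ⟨k, hk, by simpa using hi, by simpa using hx⟩
  · rintro ⟨k, hk, rfl, hx⟩
    exact ⟨(0 + (k : Int), sets[k]), (PySem.List.mem_enumerate_iff sets 0 _).2 ⟨k, hk, rfl⟩,
      by simpa using hx, by simp⟩

-- the index set of a combination ------------------------------------------------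

def pvSub (sets : List (List Int)) (c : List Int) (i : Int) : Prop :=
  ∃ k, ∃ _ : k < sets.length, i = (k : Int) ∧ ∀ y ∈ c, y ∈ sets[k]

lemma pvSubEnum (sets : List (List Int)) (c : List Int) (i : Int) :
    (∃ p ∈ PySem.List.enumerate sets 0,
        PySem.Set.issubset c (PySem.Set.ofList p.2) = true ∧ i = p.1) ↔ pvSub sets c i := by
  constructor
  · rintro ⟨p, hp, hsub, rfl⟩
    obtain ⟨k, hk, rfl⟩ := (PySem.List.mem_enumerate_iff sets 0 p).1 hp
    refine ⟨k, hk, by simp, ?_⟩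
    intro y hy
    have := (PySem.Set.issubset_iff c _).1 hsub y hy
    simpa [PySem.Set.mem_ofList] using this
  · rintro ⟨k, hk, rfl, hy⟩
    refine ⟨(0 + (k : Int), sets[k]), (PySem.List.mem_enumerate_iff sets 0 _).2 ⟨k, hk, rfl⟩, ?_, by simp⟩
    exact (PySem.Set.issubset_iff c _).2 (fun y hyc => (PySem.Set.mem_ofList _ _).2 (hy y hyc))

lemma pvMarkGetD (sets : List (List Int)) (d : PySem.Dict (List Int) (PySem.Set Int))
    (c : List Int) (i : Int) :
    i ∈ (pvA_mark sets d c).getD c [] ↔ i ∈ d.getD c [] ∨ pvSub sets c i := by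
  have hgen : ∀ (E : List (Int × List Int)) (d : PySem.Dict (List Int) (PySem.Set Int)),
      (i ∈ (E.foldl (fun d is2 => if PySem.Set.issubset c (PySem.Set.ofList is2.2) then
            d.modify c [] (fun v => PySem.Set.add v is2.1) else d) d).getD c []) ↔
        i ∈ d.getD c [] ∨ ∃ p ∈ E, PySem.Set.issubset c (PySem.Set.ofList p.2) = true ∧ i = p.1 := by
    intro E
    induction E with
    | nil => simp
    | cons a t ih =>
      intro d
      simp only [List.foldl_cons]
      by_cases hc : PySem.Set.issubset c (PySem.Set.ofList a.2) = true
      · rw [if_pos hc, ih, PySem.Dict.getD_modify_self]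
        constructor
        · rintro (h | ⟨p, hp, hs, rfl⟩)
          · rcases (PySem.Set.mem_add _ _ _).1 h with h | h
            · exact Or.inl h
            · exact Or.inr ⟨a, by simp, hc, h⟩
          · exact Or.inr ⟨p, by simp [hp], hs, rfl⟩
        · rintro (h | ⟨p, hp, hs, rfl⟩)
          · exact Or.inl ((PySem.Set.mem_add _ _ _).2 (Or.inl h))
          · rcases List.mem_cons.1 hp with rfl | hp
            · exact Or.inl ((PySem.Set.mem_add _ _ _).2 (Or.inr rfl))
            · exact Or.inr ⟨p, hp, hs, rfl⟩
      · rw [if_neg hc, ih]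
        constructor
        · rintro (h | ⟨p, hp, hs, rfl⟩)
          · exact Or.inl h
          · exact Or.inr ⟨p, by simp [hp], hs, rfl⟩
        · rintro (h | ⟨p, hp, hs, rfl⟩)
          · exact Or.inl h
          · rcases List.mem_cons.1 hp with rfl | hp
            · exact absurd hs hc
            · exact Or.inr ⟨p, hp, hs, rfl⟩
  unfold pvA_mark
  rw [hgen, pvSubEnum]

lemma pvMarkGetDNe (sets : List (List Int)) (d : PySem.Dict (List Int) (PySem.Set Int))
    (c c' : List Int) (h : c' ≠ c) :
    (pvA_mark sets d c).getD c' [] = d.getD c' [] := by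
  have hgen : ∀ (E : List (Int × List Int)) (d : PySem.Dict (List Int) (PySem.Set Int)),
      (E.foldl (fun d is2 => if PySem.Set.issubset c (PySem.Set.ofList is2.2) then
          d.modify c [] (fun v => PySem.Set.add v is2.1) else d) d).getD c' [] = d.getD c' [] := by
    intro E
    induction E with
    | nil => simp
    | cons a t ih =>
      intro d
      simp only [List.foldl_cons]
      by_cases hc : PySem.Set.issubset c (PySem.Set.ofList a.2) = true
      · rw [if_pos hc, ih, PySem.Dict.getD_modify_of_ne _ _ _ h]
      · rw [if_neg hc, ih]
  unfold pvA_mark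
  exact hgen _ d

lemma pvMarkKeys (sets : List (List Int)) (d : PySem.Dict (List Int) (PySem.Set Int))
    (c c' : List Int) :
    c' ∈ (pvA_mark sets d c).keys ↔ c' ∈ d.keys ∨ (c' = c ∧ ∃ i, pvSub sets c i) := by
  have hgen : ∀ (E : List (Int × List Int)) (d : PySem.Dict (List Int) (PySem.Set Int)),
      (c' ∈ (E.foldl (fun d is2 => if PySem.Set.issubset c (PySem.Set.ofList is2.2) then
          d.modify c [] (fun v => PySem.Set.add v is2.1) else d) d).keys) ↔
        c' ∈ d.keys ∨ (c' = c ∧ ∃ p ∈ E, PySem.Set.issubset c (PySem.Set.ofList p.2) = true) := by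
    intro E
    induction E with
    | nil => simp
    | cons a t ih =>
      intro d
      simp only [List.foldl_cons]
      by_cases hc : PySem.Set.issubset c (PySem.Set.ofList a.2) = true
      · rw [if_pos hc, ih]
        rw [PySem.Dict.keys_modify]
        constructor
        · rintro (h | ⟨rfl, p, hp, hs⟩)
          · rcases (PySem.Dict.mem_keys_insert _ _ _ _).1 h with h | h
            · exact Or.inr ⟨h, a, by simp, hc⟩
            · exact Or.inl h
          · exact Or.inr ⟨rfl, p, by simp [hp], hs⟩
        · rintro (h | ⟨rfl, p, hp, hs⟩)
          · exact Or.inl ((PySem.Dict.mem_keys_insert _ _ _ _).2 (Or.inr h))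
          · rcases List.mem_cons.1 hp with rfl | hp
            · exact Or.inl ((PySem.Dict.mem_keys_insert _ _ _ _).2 (Or.inl rfl))
            · exact Or.inr ⟨rfl, p, hp, hs⟩
      · rw [if_neg hc, ih]
        constructor
        · rintro (h | ⟨rfl, p, hp, hs⟩)
          · exact Or.inl h
          · exact Or.inr ⟨rfl, p, by simp [hp], hs⟩
        · rintro (h | ⟨rfl, p, hp, hs⟩)
          · exact Or.inl h
          · rcases List.mem_cons.1 hp with rfl | hp
            · exact absurd hs hc
            · exact Or.inr ⟨rfl, p, hp, hs⟩
  unfold pvA_mark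
  rw [hgen]
  constructor
  · rintro (h | ⟨heq, p, hp, hs⟩)
    · exact Or.inl h
    · subst heq
      exact Or.inr ⟨rfl, p.1, (pvSubEnum _ _ p.1).1 ⟨p, hp, hs, rfl⟩⟩
  · rintro (h | ⟨heq, i, hi⟩)
    · exact Or.inl h
    · subst heq
      obtain ⟨p, hp, hs, _⟩ := (pvSubEnum _ _ i).2 hi
      exact Or.inr ⟨rfl, p, hp, hs⟩

-- comb_to_sets -----------------------------------------------------------------

def pvK (sets : List (List Int)) (c : List Int) : Prop :=
  ∃ s ∈ sets, ∃ r : Nat, 2 ≤ r ∧ ∃ comb ∈ PySem.List.combinations s r, c = pvFrozen comb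

lemma pvCombKeysSound (sets : List (List Int)) :
    ∀ c ∈ (pvA_comb_to_sets sets).keys, pvK sets c := by
  unfold pvA_comb_to_sets
  refine pvFoldlPres (fun d : PySem.Dict (List Int) (PySem.Set Int) => ∀ c ∈ d.keys, pvK sets c) _ sets PySem.Dict.empty ?_ ?_
  · intro c hc
    rw [show (PySem.Dict.empty : PySem.Dict (List Int) (PySem.Set Int)).keys = [] from PySem.Dict.keys_empty] at hc
    simp at hc
  · intro d s hs hP
    refine pvFoldlPres (fun d : PySem.Dict (List Int) (PySem.Set Int) => ∀ c ∈ d.keys, pvK sets c) _ _ d hP ?_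
    intro d size hsize hP
    refine pvFoldlPres (fun d : PySem.Dict (List Int) (PySem.Set Int) => ∀ c ∈ d.keys, pvK sets c) _ _ d hP ?_
    intro d comb hcomb hP
    intro c hc
    rcases (pvMarkKeys sets d (pvFrozen comb) c).1 hc with h | ⟨rfl, _⟩
    · exact hP c h
    · have h2 : (2 : Int) ≤ size := ((PySem.List.mem_pyRange_one).1 hsize).1
      exact ⟨s, hs, size.toNat, by omega, comb, hcomb, rfl⟩

lemma pvCombKeysComplete (sets : List (List Int)) (c : List Int) (h : pvK sets c) :
    c ∈ (pvA_comb_to_sets sets).keys := by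
  obtain ⟨s, hs, r, hr2, comb, hcomb, rfl⟩ := h
  have hcombfacts := (PySem.List.mem_combinations_iff s r comb).1 hcomb
  have hsublist : comb.Sublist s := hcombfacts.1
  have hlen : comb.length = r := hcombfacts.2
  obtain ⟨k, hk, hsk⟩ := List.mem_iff_getElem.1 hs
  have hmark : ∀ d, pvFrozen comb ∈ (pvA_mark sets d (pvFrozen comb)).keys := by
    intro d
    refine (pvMarkKeys sets d _ _).2 (Or.inr ⟨rfl, (k : Int), k, hk, rfl, ?_⟩)
    intro y hy
    rw [hsk]
    exact hsublist.subset ((pvMemFrozen comb y).1 hy)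
  have hpresMark : ∀ (d : PySem.Dict (List Int) (PySem.Set Int)) (c' : List Int),
      pvFrozen comb ∈ d.keys → pvFrozen comb ∈ (pvA_mark sets d c').keys :=
    fun d c' h => (pvMarkKeys sets d c' _).2 (Or.inl h)
  unfold pvA_comb_to_sets
  refine pvFoldlReach (fun d : PySem.Dict (List Int) (PySem.Set Int) => pvFrozen comb ∈ d.keys) _ s ?_ ?_ sets PySem.Dict.empty hs
  · intro d
    refine pvFoldlReach (fun d : PySem.Dict (List Int) (PySem.Set Int) => pvFrozen comb ∈ d.keys) _ ((r : Nat) : Int) ?_ ?_ _ d ?_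
    · intro d
      refine pvFoldlReach (fun d : PySem.Dict (List Int) (PySem.Set Int) => pvFrozen comb ∈ d.keys) _ comb ?_ ?_ _ d ?_
      · intro d; exact hmark d
      · intro d a h; exact hpresMark d (pvFrozen a) h
      · simpa [Int.toNat_natCast] using hcomb
    · intro d size h
      refine pvFoldlPres (fun d : PySem.Dict (List Int) (PySem.Set Int) => pvFrozen comb ∈ d.keys) _ _ d h ?_
      intro d a _ h; exact hpresMark d (pvFrozen a) h
    · rw [PySem.List.mem_pyRange_one]
      have hls := hsublist.length_le
      rw [PySem.List.len_eq]
      constructor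
      · exact_mod_cast hr2
      · push_cast; omega
  · intro d a h
    refine pvFoldlPres (fun d : PySem.Dict (List Int) (PySem.Set Int) => pvFrozen comb ∈ d.keys) _ _ d h ?_
    intro d size _ h
    refine pvFoldlPres (fun d : PySem.Dict (List Int) (PySem.Set Int) => pvFrozen comb ∈ d.keys) _ _ d h ?_
    intro d cb _ h; exact hpresMark d (pvFrozen cb) h

lemma pvCombKeys (sets : List (List Int)) (c : List Int) :
    c ∈ (pvA_comb_to_sets sets).keys ↔ pvK sets c :=
  ⟨pvCombKeysSound sets c, pvCombKeysComplete sets c⟩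

lemma pvMarkInv (sets : List (List Int)) (d : PySem.Dict (List Int) (PySem.Set Int)) (c : List Int)
    (hP : ∀ c' ∈ d.keys, ∀ i, (i ∈ d.getD c' [] ↔ pvSub sets c' i)) :
    ∀ c' ∈ (pvA_mark sets d c).keys, ∀ i, (i ∈ (pvA_mark sets d c).getD c' [] ↔ pvSub sets c' i) := by
  intro c' hc' i
  by_cases hcc : c' = c
  · subst hcc
    rw [pvMarkGetD]
    by_cases hk : c' ∈ d.keys
    · rw [hP c' hk i]
      exact ⟨fun h => h.elim id id, Or.inl⟩
    · have hnone : d.getD c' [] = [] :=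
        PySem.Dict.getD_of_not_contains d []
          (Bool.eq_false_iff.2 (fun h => hk ((PySem.Dict.contains_iff_mem_keys d c').1 h)))
      rw [hnone]
      simp only [List.not_mem_nil, false_or]
  · rw [pvMarkGetDNe sets d c c' hcc]
    refine hP c' ?_ i
    rcases (pvMarkKeys sets d c c').1 hc' with h | ⟨h, _⟩
    · exact h
    · exact absurd h hcc

lemma pvCombGetD (sets : List (List Int)) (c : List Int)
    (h : c ∈ (pvA_comb_to_sets sets).keys) (i : Int) :
    i ∈ (pvA_comb_to_sets sets).getD c [] ↔ pvSub sets c i := by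
  have hInv : ∀ c' ∈ (pvA_comb_to_sets sets).keys, ∀ i,
      (i ∈ (pvA_comb_to_sets sets).getD c' [] ↔ pvSub sets c' i) := by
    unfold pvA_comb_to_sets
    refine pvFoldlPres (fun d : PySem.Dict (List Int) (PySem.Set Int) => ∀ c' ∈ d.keys, ∀ i, (i ∈ d.getD c' [] ↔ pvSub sets c' i))
      _ sets PySem.Dict.empty ?_ ?_
    · intro c' hc'
      rw [show (PySem.Dict.empty : PySem.Dict (List Int) (PySem.Set Int)).keys = [] from PySem.Dict.keys_empty] at hc'
      simp at hc'
    · intro d s _ hP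
      refine pvFoldlPres (fun d : PySem.Dict (List Int) (PySem.Set Int) => ∀ c' ∈ d.keys, ∀ i, (i ∈ d.getD c' [] ↔ pvSub sets c' i)) _ _ d hP ?_
      intro d size _ hP
      refine pvFoldlPres (fun d : PySem.Dict (List Int) (PySem.Set Int) => ∀ c' ∈ d.keys, ∀ i, (i ∈ d.getD c' [] ↔ pvSub sets c' i)) _ _ d hP ?_
      intro d comb _ hP
      exact pvMarkInv sets d (pvFrozen comb) hP
  exact hInv c h i

lemma pvMarkNodupKeys (sets : List (List Int)) (d : PySem.Dict (List Int) (PySem.Set Int))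
    (c : List Int) (hd : d.keys.Nodup) : (pvA_mark sets d c).keys.Nodup := by
  unfold pvA_mark
  refine pvFoldlPres (fun d : PySem.Dict (List Int) (PySem.Set Int) => d.keys.Nodup) _ _ d hd ?_
  intro d a _ hd
  by_cases hc : PySem.Set.issubset c (PySem.Set.ofList a.2) = true
  · rw [if_pos hc, PySem.Dict.keys_modify]
    exact PySem.Dict.nodup_keys_insert _ _ _ hd
  · rw [if_neg hc]; exact hd

lemma pvCombNodupKeys (sets : List (List Int)) : (pvA_comb_to_sets sets).keys.Nodup := by
  unfold pvA_comb_to_sets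
  refine pvFoldlPres (fun d : PySem.Dict (List Int) (PySem.Set Int) => d.keys.Nodup)
    _ sets PySem.Dict.empty ?_ ?_
  · show (PySem.Dict.empty : PySem.Dict (List Int) (PySem.Set Int)).keys.Nodup
    rw [PySem.Dict.keys_empty]; exact List.nodup_nil
  · intro d s _ hd
    refine pvFoldlPres (fun d : PySem.Dict (List Int) (PySem.Set Int) => d.keys.Nodup) _ _ d hd ?_
    intro d size _ hd
    refine pvFoldlPres (fun d : PySem.Dict (List Int) (PySem.Set Int) => d.keys.Nodup) _ _ d hd ?_
    intro d comb _ hd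
    exact pvMarkNodupKeys sets d (pvFrozen comb) hd

-- valid subsets ----------------------------------------------------------------

lemma pvMemValid (sets : List (List Int)) (v : List Int) :
    v ∈ pvA_valid sets ↔ pvK sets v ∧
      (∀ x ∈ v, PySem.Set.equal (pvSig sets x) ((pvA_comb_to_sets sets).getD v []) = true) := by
  unfold pvA_valid
  rw [pvMemFoldlAddIf]
  have hempty : (v ∈ (PySem.Set.empty : PySem.Set (List Int))) ↔ False := by
    simp [PySem.Set.empty]
  rw [hempty]
  simp only [false_or]
  constructor
  · rintro ⟨ci, hci, hall, rfl⟩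
    have hkeys : ci.1 ∈ (pvA_comb_to_sets sets).keys := PySem.Dict.mem_keys_of_mem_items _ hci
    have hgd : (pvA_comb_to_sets sets).getD ci.1 [] = ci.2 :=
      PySem.Dict.getD_of_mem_items _ hci (pvCombNodupKeys sets) []
    refine ⟨(pvCombKeys sets ci.1).1 hkeys, ?_⟩
    intro x hx
    rw [hgd]
    exact (List.all_eq_true.1 hall) x hx
  · rintro ⟨hK, hall⟩
    have hkeys : v ∈ (pvA_comb_to_sets sets).keys := (pvCombKeys sets v).2 hK
    refine ⟨(v, (pvA_comb_to_sets sets).getD v []), ?_, ?_, rfl⟩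
    · rw [PySem.Dict.items_eq_map_keys _ (pvCombNodupKeys sets) []]
      exact List.mem_map_of_mem hkeys
    · exact List.all_eq_true.2 (fun x hx => hall x hx)

-- maximal subsets --------------------------------------------------------------

lemma pvMemMaximal (sets : List (List Int)) (u : List Int) :
    u ∈ pvA_maximal sets ↔ u ∈ pvA_valid sets ∧
      ¬ ∃ w ∈ pvA_valid sets, u ≠ w ∧ PySem.Set.issubset u w = true := by
  have hinner : ∀ (v : List Int) (l : List (List Int)) (ms : PySem.Set (List Int)) (x : List Int),
      (x ∈ l.foldl (fun ms larger =>
          if v ≠ larger ∧ PySem.Set.issubset v larger = true then PySem.Set.discard ms v else ms) ms) ↔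
        x ∈ ms ∧ ¬(x = v ∧ ∃ w ∈ l, v ≠ w ∧ PySem.Set.issubset v w = true) := by
    intro v l
    induction l with
    | nil => simp
    | cons a t ih =>
      intro ms x
      simp only [List.foldl_cons]
      by_cases hc : v ≠ a ∧ PySem.Set.issubset v a = true
      · rw [if_pos hc, ih]
        constructor
        · rintro ⟨hms, _⟩
          have hmd := (PySem.Set.mem_discard ms v x).1 hms
          exact ⟨hmd.1, by rintro ⟨rfl, _⟩; exact hmd.2 rfl⟩
        · rintro ⟨hms, hnot⟩
          have hxv : x ≠ v := by rintro rfl; exact hnot ⟨rfl, a, by simp, hc⟩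
          refine ⟨(PySem.Set.mem_discard ms v x).2 ⟨hms, hxv⟩, ?_⟩
          rintro ⟨rfl, w, hw, hvw⟩
          exact hnot ⟨rfl, w, List.mem_cons_of_mem _ hw, hvw⟩
      · rw [if_neg hc, ih]
        constructor
        · rintro ⟨hms, hnot⟩
          refine ⟨hms, ?_⟩
          rintro ⟨rfl, w, hw, hvw⟩
          rcases List.mem_cons.1 hw with rfl | hw
          · exact hc hvw
          · exact hnot ⟨rfl, w, hw, hvw⟩
        · rintro ⟨hms, hnot⟩
          refine ⟨hms, ?_⟩
          rintro ⟨rfl, w, hw, hvw⟩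
          exact hnot ⟨rfl, w, List.mem_cons_of_mem _ hw, hvw⟩
  have houter : ∀ (l : List (List Int)) (ms : PySem.Set (List Int)) (x : List Int),
      (x ∈ l.foldl (fun ms subset => (pvA_valid sets).foldl (fun ms larger =>
          if subset ≠ larger ∧ PySem.Set.issubset subset larger = true then
            PySem.Set.discard ms subset else ms) ms) ms) ↔
        x ∈ ms ∧ ¬(x ∈ l ∧ ∃ w ∈ pvA_valid sets, x ≠ w ∧ PySem.Set.issubset x w = true) := by
    intro l
    induction l with
    | nil => simp
    | cons a t ih =>
      intro ms x
      simp only [List.foldl_cons]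
      rw [ih, hinner a]
      constructor
      · rintro ⟨⟨hms, hn1⟩, hn2⟩
        refine ⟨hms, ?_⟩
        rintro ⟨hmem, hbad⟩
        rcases List.mem_cons.1 hmem with rfl | hmem
        · exact hn1 ⟨rfl, hbad⟩
        · exact hn2 ⟨hmem, hbad⟩
      · rintro ⟨hms, hn⟩
        refine ⟨⟨hms, ?_⟩, ?_⟩
        · rintro ⟨rfl, hbad⟩; exact hn ⟨by simp, hbad⟩
        · rintro ⟨hmem, hbad⟩; exact hn ⟨List.mem_cons_of_mem _ hmem, hbad⟩
  unfold pvA_maximal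
  rw [houter, PySem.Set.mem_ofList]
  constructor
  · rintro ⟨h1, h2⟩
    exact ⟨h1, fun ⟨w, hw, hne, hsub⟩ => h2 ⟨h1, w, hw, hne, hsub⟩⟩
  · rintro ⟨h1, h2⟩
    exact ⟨h1, fun ⟨_, w, hw, hne, hsub⟩ => h2 ⟨w, hw, hne, hsub⟩⟩

-- the signature class of an item -----------------------------------------------

def pvCls (sets : List (List Int)) (x : Int) : List Int :=
  pvFrozen ((sets.flatten).filter (fun y => PySem.Set.equal (pvSig sets y) (pvSig sets x)))

lemma pvMemCls (sets : List (List Int)) (x z : Int) :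
    z ∈ pvCls sets x ↔ z ∈ sets.flatten ∧ (∀ i, i ∈ pvSig sets z ↔ i ∈ pvSig sets x) := by
  unfold pvCls
  rw [pvMemFrozen, List.mem_filter, PySem.Set.equal_iff]

lemma pvClsPairwise (sets : List (List Int)) (x : Int) : (pvCls sets x).Pairwise (· < ·) :=
  pvFrozenPairwise _

lemma pvClsCongr (sets : List (List Int)) {x y : Int}
    (h : ∀ i, i ∈ pvSig sets y ↔ i ∈ pvSig sets x) : pvCls sets y = pvCls sets x := by
  unfold pvCls
  rw [pvFrozenEqIff]
  intro z
  simp only [List.mem_filter, PySem.Set.equal_iff]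
  constructor
  · rintro ⟨h1, h2⟩; exact ⟨h1, fun i => (h2 i).trans (h i)⟩
  · rintro ⟨h1, h2⟩; exact ⟨h1, fun i => (h2 i).trans (h i).symm⟩

lemma pvSelfMemCls (sets : List (List Int)) {x : Int} (hx : x ∈ sets.flatten) :
    x ∈ pvCls sets x := (pvMemCls sets x x).2 ⟨hx, fun _ => Iff.rfl⟩

-- semantic facts about valid/maximal -------------------------------------------

lemma pvKElem (sets : List (List Int)) {v : List Int} (h : pvK sets v) :
    v.Pairwise (· < ·) ∧ v ≠ [] ∧ ∃ s ∈ sets, ∀ y ∈ v, y ∈ s := by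
  obtain ⟨s, hs, r, hr2, comb, hcomb, rfl⟩ := h
  have hcombfacts := (PySem.List.mem_combinations_iff s r comb).1 hcomb
  have hcombne : comb ≠ [] := by
    intro h0
    rw [h0] at hcombfacts
    simp at hcombfacts
    omega
  obtain ⟨z, hz⟩ := List.exists_mem_of_ne_nil comb hcombne
  refine ⟨pvFrozenPairwise comb, List.ne_nil_of_mem ((pvMemFrozen comb z).2 hz), s, hs, ?_⟩
  intro y hy
  exact hcombfacts.1.subset ((pvMemFrozen comb y).1 hy)

lemma pvKCls (sets : List (List Int)) {x : Int} (hx : x ∈ sets.flatten)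
    (h2 : 2 ≤ (pvCls sets x).length) : pvK sets (pvCls sets x) := by
  obtain ⟨s0, hs0, hxs0⟩ := List.mem_flatten.1 hx
  obtain ⟨k, hk, hsk⟩ := List.mem_iff_getElem.1 hs0
  have hsub : ∀ y ∈ pvCls sets x, y ∈ sets[k] := by
    intro y hy
    have h1 := (pvMemCls sets x y).1 hy
    have hxk : (k : Int) ∈ pvSig sets x := (pvMemSig sets x (k : Int)).2 ⟨k, hk, rfl, hsk ▸ hxs0⟩
    have hyk : (k : Int) ∈ pvSig sets y := (h1.2 (k : Int)).2 hxk
    obtain ⟨k', hk', hkk, hy'⟩ := (pvMemSig sets y (k : Int)).1 hyk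
    have hkeq : k' = k := by exact_mod_cast hkk.symm
    subst hkeq
    exact hy'
  set comb := (sets[k]).filter (fun y => decide (y ∈ pvCls sets x)) with hcombdef
  have hclscomb : ∀ z, z ∈ pvCls sets x ↔ z ∈ comb := by
    intro z
    rw [hcombdef, List.mem_filter]
    constructor
    · intro h; exact ⟨hsub z h, by simpa using h⟩
    · intro h; simpa using h.2
  have hclsnodup : (pvCls sets x).Nodup := (pvClsPairwise sets x).imp (fun h => ne_of_lt h)
  have hlen : (pvCls sets x).length ≤ comb.length :=
    (List.Nodup.subperm hclsnodup (fun z hz => (hclscomb z).1 hz)).length_le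
  refine ⟨sets[k], List.getElem_mem hk, comb.length, by omega, comb, ?_, ?_⟩
  · exact (PySem.List.mem_combinations_iff _ _ _).2 ⟨List.filter_sublist, rfl⟩
  · exact pvEqOfPairwiseLt (pvClsPairwise sets x) (pvFrozenPairwise comb)
      (fun z => by rw [pvMemFrozen]; exact hclscomb z)

lemma pvValidSub (sets : List (List Int)) {v : List Int} (hv : v ∈ pvA_valid sets)
    {x : Int} (hx : x ∈ v) : ∀ z ∈ v, z ∈ pvCls sets x := by
  obtain ⟨hK, hall⟩ := (pvMemValid sets v).1 hv
  obtain ⟨_, _, s, hs, hsubs⟩ := pvKElem sets hK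
  intro z hz
  refine (pvMemCls sets x z).2 ⟨List.mem_flatten.2 ⟨s, hs, hsubs z hz⟩, ?_⟩
  intro i
  have hxe := (PySem.Set.equal_iff _ _).1 (hall x hx) i
  have hze := (PySem.Set.equal_iff _ _).1 (hall z hz) i
  rw [hze, hxe]

lemma pvClsValid (sets : List (List Int)) {x : Int} (_hx : x ∈ sets.flatten)
    (hK : pvK sets (pvCls sets x)) : pvCls sets x ∈ pvA_valid sets := by
  have hkeys : pvCls sets x ∈ (pvA_comb_to_sets sets).keys := (pvCombKeys sets _).2 hK
  refine (pvMemValid sets _).2 ⟨hK, ?_⟩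
  intro y hy
  rw [PySem.Set.equal_iff]
  intro i
  rw [pvCombGetD sets _ hkeys i]
  have hysig := ((pvMemCls sets x y).1 hy).2
  constructor
  · intro hiy
    obtain ⟨k, hk, rfl, hyk⟩ := (pvMemSig sets y i).1 hiy
    refine ⟨k, hk, rfl, ?_⟩
    intro z hz
    have hzsig := ((pvMemCls sets x z).1 hz).2
    have hik : (k : Int) ∈ pvSig sets z := by
      rw [hzsig]
      rw [← hysig]
      exact (pvMemSig sets y (k : Int)).2 ⟨k, hk, rfl, hyk⟩
    obtain ⟨k', hk', hkk, hz'⟩ := (pvMemSig sets z (k : Int)).1 hik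
    have hkeq : k' = k := by exact_mod_cast hkk.symm
    subst hkeq
    exact hz'
  · rintro ⟨k, hk, rfl, hall⟩
    exact (pvMemSig sets y (k : Int)).2 ⟨k, hk, rfl, hall y hy⟩

lemma pvMemMaximalIff (sets : List (List Int)) (u : List Int) :
    u ∈ pvA_maximal sets ↔ ∃ x ∈ sets.flatten, u = pvCls sets x ∧ pvK sets u := by
  rw [pvMemMaximal]
  constructor
  · rintro ⟨hval, hnob⟩
    have hKu : pvK sets u := ((pvMemValid sets u).1 hval).1
    obtain ⟨hpw, hne, s, hs, hsubs⟩ := pvKElem sets hKu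
    obtain ⟨x, hxu⟩ := List.exists_mem_of_ne_nil u hne
    have hxf : x ∈ sets.flatten := List.mem_flatten.2 ⟨s, hs, hsubs x hxu⟩
    have husub : ∀ z ∈ u, z ∈ pvCls sets x := pvValidSub sets hval hxu
    by_cases heq : u = pvCls sets x
    · exact ⟨x, hxf, heq, hKu⟩
    · exfalso
      have hz : ∃ z ∈ pvCls sets x, z ∉ u := by
        by_contra hcon
        push_neg at hcon
        exact heq (pvEqOfPairwiseLt hpw (pvClsPairwise sets x) (fun z => ⟨husub z, hcon z⟩))
      obtain ⟨z, hzc, hzu⟩ := hz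
      have hxz : x ≠ z := fun h => hzu (h ▸ hxu)
      have h2 : 2 ≤ (pvCls sets x).length := by
        have hsp : [x, z].Subperm (pvCls sets x) := by
          refine List.Nodup.subperm (by simp [hxz]) ?_
          intro w hw
          rcases List.mem_cons.1 hw with rfl | hw
          · exact pvSelfMemCls sets hxf
          · rcases List.mem_cons.1 hw with rfl | hw
            · exact hzc
            · simp at hw
        simpa using hsp.length_le
      exact hnob ⟨pvCls sets x, pvClsValid sets hxf (pvKCls sets hxf h2), heq,
        (PySem.Set.issubset_iff _ _).2 husub⟩
  · rintro ⟨x, hxf, rfl, hKu⟩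
    refine ⟨pvClsValid sets hxf hKu, ?_⟩
    rintro ⟨w, hwv, hne, hsub⟩
    have hxw : x ∈ w := (PySem.Set.issubset_iff _ _).1 hsub x (pvSelfMemCls sets hxf)
    have hwc : ∀ z ∈ w, z ∈ pvCls sets x := pvValidSub sets hwv hxw
    have hpw : w.Pairwise (· < ·) := (pvKElem sets ((pvMemValid sets w).1 hwv).1).1
    exact hne (pvEqOfPairwiseLt (pvClsPairwise sets x) hpw
      (fun z => ⟨fun h => (PySem.Set.issubset_iff _ _).1 hsub z h, fun h => hwc z h⟩))

lemma pvClsSingleton (sets : List (List Int)) {x : Int} (hx : x ∈ sets.flatten)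
    (h : ¬ 2 ≤ (pvCls sets x).length) : pvCls sets x = [x] := by
  have hxm := pvSelfMemCls sets hx
  have h1 : 0 < (pvCls sets x).length := List.length_pos_of_mem hxm
  have hlen : (pvCls sets x).length = 1 := by omega
  obtain ⟨a, ha⟩ := List.length_eq_one_iff.1 hlen
  rw [ha] at hxm ⊢
  rcases List.mem_singleton.1 hxm with rfl
  rfl

-- result of A -------------------------------------------------------------------

lemma pvMemResA (sets : List (List Int)) (g : List Int) :
    g ∈ pvA_res sets ↔ ∃ x ∈ sets.flatten, g = pvCls sets x := by
  have hsing : ∀ x : Int,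
      (x ∈ (PySem.Set.ofList sets.flatten).filter
          (fun item => !((PySem.Set.ofList (pvA_maximal sets).flatten).contains item))) ↔
        (x ∈ sets.flatten ∧ ¬ ∃ g' ∈ pvA_maximal sets, x ∈ g') := by
    intro x
    rw [List.mem_filter, PySem.Set.mem_ofList]
    constructor
    · rintro ⟨h1, h2⟩
      refine ⟨h1, ?_⟩
      rintro ⟨g', hg', hxg'⟩
      simp at h2
      exact h2 g' hg' hxg'
    · rintro ⟨h1, h2⟩
      refine ⟨h1, ?_⟩
      simp
      exact fun g' hg' hxg' => h2 ⟨g', hg', hxg'⟩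
  unfold pvA_res
  simp only []
  rw [pvMemFoldlAdd]
  constructor
  · rintro (hmax | ⟨x, hxs, rfl⟩)
    · obtain ⟨x, hxf, rfl, _⟩ := (pvMemMaximalIff sets g).1 hmax
      exact ⟨x, hxf, rfl⟩
    · obtain ⟨hxf, hnog⟩ := (hsing x).1 hxs
      have hnm : pvCls sets x ∉ pvA_maximal sets :=
        fun hc => hnog ⟨_, hc, pvSelfMemCls sets hxf⟩
      have hnK : ¬ pvK sets (pvCls sets x) :=
        fun hK => hnm ((pvMemMaximalIff sets _).2 ⟨x, hxf, rfl, hK⟩)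
      have hn2 : ¬ 2 ≤ (pvCls sets x).length := fun h2 => hnK (pvKCls sets hxf h2)
      refine ⟨x, hxf, ?_⟩
      rw [pvFrozenSingleton, pvClsSingleton sets hxf hn2]
  · rintro ⟨x, hxf, rfl⟩
    by_cases hK : pvK sets (pvCls sets x)
    · exact Or.inl ((pvMemMaximalIff sets _).2 ⟨x, hxf, rfl, hK⟩)
    · have hn2 : ¬ 2 ≤ (pvCls sets x).length := fun h2 => hK (pvKCls sets hxf h2)
      have hcx : pvCls sets x = [x] := pvClsSingleton sets hxf hn2
      refine Or.inr ⟨x, ?_, by rw [pvFrozenSingleton, hcx]⟩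
      refine (hsing x).2 ⟨hxf, ?_⟩
      rintro ⟨g', hg', hxg'⟩
      obtain ⟨y, hyf, rfl, hKg⟩ := (pvMemMaximalIff sets g').1 hg'
      have hsig := ((pvMemCls sets y x).1 hxg').2
      have : pvCls sets x = pvCls sets y := pvClsCongr sets hsig
      exact hK (this ▸ hKg)

-- result of B -------------------------------------------------------------------

def pvPairs (sets : List (List Int)) : List (Int × Int) :=
  ((PySem.List.enumerate sets).map (fun is => is.2.map (fun x => (is.1, x)))).flatten

lemma pvOccFlatEq (sets : List (List Int)) :
    pvA_item_to_sets sets =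
      (pvPairs sets).foldl (fun d p => d.modify p.2 [] (fun v => PySem.Set.add v p.1))
        PySem.Dict.empty := by
  unfold pvA_item_to_sets pvPairs
  rw [List.foldl_flatten, List.foldl_map]
  simp only [List.foldl_map]

lemma pvMemPairsSnd (sets : List (List Int)) (x : Int) :
    x ∈ (pvPairs sets).map (fun p => p.2) ↔ x ∈ sets.flatten := by
  unfold pvPairs
  constructor
  · intro h
    obtain ⟨p, hp, rfl⟩ := List.mem_map.1 h
    obtain ⟨l, hl, hpl⟩ := List.mem_flatten.1 hp
    obtain ⟨is, his, rfl⟩ := List.mem_map.1 hl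
    obtain ⟨y, hy, rfl⟩ := List.mem_map.1 hpl
    obtain ⟨k, hk, rfl⟩ := (PySem.List.mem_enumerate_iff sets 0 is).1 his
    exact List.mem_flatten.2 ⟨sets[k], List.getElem_mem hk, hy⟩
  · intro h
    obtain ⟨s, hs, hxs⟩ := List.mem_flatten.1 h
    obtain ⟨k, hk, hsk⟩ := List.mem_iff_getElem.1 hs
    refine List.mem_map.2 ⟨(0 + (k : Int), x), ?_, rfl⟩
    refine List.mem_flatten.2 ⟨sets[k].map (fun y => (0 + (k : Int), y)), ?_, ?_⟩
    · exact List.mem_map.2 ⟨(0 + (k : Int), sets[k]),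
        (PySem.List.mem_enumerate_iff sets 0 _).2 ⟨k, hk, rfl⟩, rfl⟩
    · exact List.mem_map.2 ⟨x, hsk ▸ hxs, rfl⟩

lemma pvOccKeysMem (sets : List (List Int)) (x : Int) :
    x ∈ (pvA_item_to_sets sets).keys ↔ x ∈ sets.flatten := by
  rw [pvOccFlatEq]
  rw [PySem.Dict.keys_foldl_modify_key (pvPairs sets) (fun p => p.2) []
    (fun _ p => fun v => PySem.Set.add v p.1) PySem.Dict.empty]
  rw [PySem.Dict.keys_empty]
  rw [PySem.Set.mem_update]
  simp only [List.not_mem_nil, false_or]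
  exact pvMemPairsSnd sets x

lemma pvOccKeysNodup (sets : List (List Int)) : (pvA_item_to_sets sets).keys.Nodup := by
  rw [pvOccFlatEq]
  exact PySem.Dict.nodup_keys_foldl_modify_key (pvPairs sets) (fun p => p.2) []
    (fun _ p => fun v => PySem.Set.add v p.1) PySem.Dict.empty
    (by rw [PySem.Dict.keys_empty]; exact List.nodup_nil)

lemma pvOccItems (sets : List (List Int)) :
    (pvA_item_to_sets sets).items =
      (pvA_item_to_sets sets).keys.map (fun k => (k, pvSig sets k)) := by
  have h := PySem.Dict.items_eq_map_keys (pvA_item_to_sets sets) (pvOccKeysNodup sets) []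
  exact h

lemma pvGroupsEq (sets : List (List Int)) :
    pvB_groups sets =
      ((pvA_item_to_sets sets).items.map (fun xv => (pvFrozen xv.2, xv.1))).foldl
        (fun g p => g.modify p.1 [] (fun l => l ++ [p.2])) PySem.Dict.empty := by
  unfold pvB_groups
  rw [List.foldl_map]
  rfl

lemma pvGroupsKeysMem (sets : List (List Int)) (κ : List Int) :
    κ ∈ (pvB_groups sets).keys ↔ ∃ x ∈ sets.flatten, κ = pvFrozen (pvSig sets x) := by
  rw [pvGroupsEq]
  rw [PySem.Dict.keys_foldl_modify_key
        ((pvA_item_to_sets sets).items.map (fun xv => (pvFrozen xv.2, xv.1)))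
        (fun p : List Int × Int => p.1) []
        (fun _ p => fun l => l ++ [p.2]) PySem.Dict.empty]
  rw [show (PySem.Dict.empty : PySem.Dict (List Int) (List Int)).keys = [] from PySem.Dict.keys_empty,
      PySem.Set.mem_update]
  simp only [List.not_mem_nil, false_or, List.map_map]
  rw [pvOccItems]
  simp only [List.map_map]
  constructor
  · intro h
    obtain ⟨k, hk, rfl⟩ := List.mem_map.1 h
    exact ⟨k, (pvOccKeysMem sets k).1 hk, rfl⟩
  · rintro ⟨x, hxf, rfl⟩
    exact List.mem_map.2 ⟨x, (pvOccKeysMem sets x).2 hxf, rfl⟩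

lemma pvGroupsKeysNodup (sets : List (List Int)) : (pvB_groups sets).keys.Nodup := by
  rw [pvGroupsEq]
  exact PySem.Dict.nodup_keys_foldl_modify_key
    ((pvA_item_to_sets sets).items.map (fun xv => (pvFrozen xv.2, xv.1)))
    (fun p : List Int × Int => p.1) []
    (fun _ p => fun l => l ++ [p.2]) PySem.Dict.empty
    (by rw [show (PySem.Dict.empty : PySem.Dict (List Int) (List Int)).keys = [] from PySem.Dict.keys_empty]
        exact List.nodup_nil)

lemma pvGroupsGetDMem (sets : List (List Int)) (κ : List Int) (z : Int) :
    z ∈ (pvB_groups sets).getD κ [] ↔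
      ∃ xv ∈ (pvA_item_to_sets sets).items, pvFrozen xv.2 = κ ∧ z = xv.1 := by
  rw [pvGroupsEq]
  rw [PySem.Dict.getD_foldl_modify_append
        ((pvA_item_to_sets sets).items.map (fun xv => (pvFrozen xv.2, xv.1)))
        PySem.Dict.empty κ]
  rw [PySem.Dict.getD_empty, List.nil_append]
  constructor
  · intro h
    obtain ⟨p, hp, rfl⟩ := List.mem_map.1 h
    obtain ⟨hpm, hq⟩ := List.mem_filter.1 hp
    obtain ⟨xv, hxv, rfl⟩ := List.mem_map.1 hpm
    exact ⟨xv, hxv, by simpa using hq, rfl⟩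
  · rintro ⟨xv, hxv, hfq, rfl⟩
    exact List.mem_map.2 ⟨(pvFrozen xv.2, xv.1),
      List.mem_filter.2 ⟨List.mem_map.2 ⟨xv, hxv, rfl⟩, by simp [hfq]⟩, rfl⟩

lemma pvGrpCls (sets : List (List Int)) {x : Int} (_hx : x ∈ sets.flatten) :
    pvFrozen ((pvB_groups sets).getD (pvFrozen (pvSig sets x)) []) = pvCls sets x := by
  unfold pvCls
  rw [pvFrozenEqIff]
  intro z
  rw [pvGroupsGetDMem, List.mem_filter]
  rw [pvOccItems]
  constructor
  · rintro ⟨xv, hxv, hfq, rfl⟩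
    obtain ⟨k, hk, rfl⟩ := List.mem_map.1 hxv
    refine ⟨(pvOccKeysMem sets k).1 hk, ?_⟩
    rw [PySem.Set.equal_iff]
    exact (pvFrozenEqIff _ _).1 hfq
  · rintro ⟨h1, h2⟩
    refine ⟨(z, pvSig sets z), List.mem_map.2 ⟨z, (pvOccKeysMem sets z).2 h1, rfl⟩, ?_, rfl⟩
    exact (pvFrozenEqIff _ _).2 ((PySem.Set.equal_iff _ _).1 h2)

lemma pvMemResB (sets : List (List Int)) (g : List Int) :
    g ∈ pvB_res sets ↔ ∃ x ∈ sets.flatten, g = pvCls sets x := by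
  unfold pvB_res
  rw [pvMemFoldlAdd]
  have hempty : (g ∈ (PySem.Set.empty : PySem.Set (List Int))) ↔ False := by
    simp [PySem.Set.empty]
  rw [hempty]
  simp only [false_or]
  have hvalues : ∀ gl, gl ∈ (pvB_groups sets).values ↔
      ∃ κ ∈ (pvB_groups sets).keys, gl = (pvB_groups sets).getD κ [] := by
    intro gl
    rw [PySem.Dict.values_eq_map_keys _ (pvGroupsKeysNodup sets) []]
    constructor
    · intro h
      obtain ⟨κ, hκ, rfl⟩ := List.mem_map.1 h
      exact ⟨κ, hκ, rfl⟩
    · rintro ⟨κ, hκ, rfl⟩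
      exact List.mem_map.2 ⟨κ, hκ, rfl⟩
  constructor
  · rintro ⟨gl, hgl, rfl⟩
    obtain ⟨κ, hκ, rfl⟩ := (hvalues gl).1 hgl
    obtain ⟨x, hxf, rfl⟩ := (pvGroupsKeysMem sets κ).1 hκ
    exact ⟨x, hxf, (pvGrpCls sets hxf)⟩
  · rintro ⟨x, hxf, rfl⟩
    refine ⟨(pvB_groups sets).getD (pvFrozen (pvSig sets x)) [], ?_, ?_⟩
    · exact (hvalues _).2 ⟨pvFrozen (pvSig sets x), (pvGroupsKeysMem sets _).2 ⟨x, hxf, rfl⟩, rfl⟩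
    · rw [pvGrpCls sets hxf]

-- nodup of the two result sets --------------------------------------------------

lemma pvNodupMaximal (sets : List (List Int)) : (pvA_maximal sets).Nodup := by
  unfold pvA_maximal
  refine pvFoldlPres (fun s : PySem.Set (List Int) => s.Nodup) _ _ _
    (PySem.Set.nodup_ofList _) ?_
  intro ms v _ hms
  refine pvFoldlPres (fun s : PySem.Set (List Int) => s.Nodup) _ _ ms hms ?_
  intro ms w _ hms
  by_cases hc : v ≠ w ∧ PySem.Set.issubset v w = true
  · rw [if_pos hc]; exact PySem.Set.nodup_discard _ _ hms
  · rw [if_neg hc]; exact hms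

lemma pvNodupResA (sets : List (List Int)) : (pvA_res sets).Nodup := by
  unfold pvA_res
  simp only []
  refine pvFoldlPres (fun s : PySem.Set (List Int) => s.Nodup) _ _ _ (pvNodupMaximal sets) ?_
  intro s x _ hs
  exact PySem.Set.nodup_add _ _ hs

lemma pvNodupResB (sets : List (List Int)) : (pvB_res sets).Nodup := by
  unfold pvB_res
  refine pvFoldlPres (fun s : PySem.Set (List Int) => s.Nodup) _ _ PySem.Set.empty
    (by simp [PySem.Set.empty]) ?_
  intro s gl _ hs
  exact PySem.Set.nodup_add _ _ hs

-- ===== VERDICT (by name: the statement is the Claim_ definition above) =====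
theorem find_maximal_subsets_spec : Claim_equal_find_maximal_subsets := by
  unfold Claim_equal_find_maximal_subsets
  intro sets _
  unfold Spec_find_maximal_subsets
  unfold find_maximal_subsets find_maximal_subsets_alt pvCanon
  have hmem : ∀ g, g ∈ pvB_res sets ↔ g ∈ pvA_res sets := by
    intro g; rw [pvMemResB, pvMemResA]
  have hperm : (@PySem.List.sorted (List Int) (List Int) List.instLinearOrder.toLT
      List.instLinearOrder.toDecidableLT (pvB_res sets) (fun g => g) false).Perm (pvA_res sets) :=
    (@PySem.List.sorted_perm (List Int) (List Int) List.instLinearOrder.toLT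
      List.instLinearOrder.toDecidableLT (pvB_res sets) (fun g => g) false).trans
      ((List.perm_ext_iff_of_nodup (pvNodupResB sets) (pvNodupResA sets)).2 hmem)
  have hnodup : (@PySem.List.sorted (List Int) (List Int) List.instLinearOrder.toLT
      List.instLinearOrder.toDecidableLT (pvB_res sets) (fun g => g) false).Nodup :=
    ((@PySem.List.sorted_perm (List Int) (List Int) List.instLinearOrder.toLT
      List.instLinearOrder.toDecidableLT (pvB_res sets) (fun g => g) false).nodup_iff).2
      (pvNodupResB sets)
  have hle := @PySem.List.sorted_pairwise (List Int) (List Int) List.instLinearOrder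
      (pvB_res sets) (fun g => g)
  have hlt : (@PySem.List.sorted (List Int) (List Int) List.instLinearOrder.toLT
      List.instLinearOrder.toDecidableLT (pvB_res sets) (fun g => g) false).Pairwise
      (fun a b => a < b) :=
    (hle.and hnodup).imp (fun h => lt_of_le_of_ne h.1 h.2)
  exact @PySem.List.sorted_eq_of_perm_of_pairwise_lt (List Int) (List Int) List.instLinearOrder
    (pvA_res sets) _ (fun g => g) hperm hlt
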